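-- pv_equiv track=rewrite | github.com/COREC/COREC-PLN-pipeline | Scripts/08_COREC_normas_preprocesamiento/08_COREC_normas_preprocesamiento_I.py | _has_common_bigram
-- ===== SOURCE A (Python) =====
-- def _has_common_bigram(a: str, b: str) -> bool:
--     if len(a) < 2 or len(b) < 2:
--         return False
--     bigrams = {a[i:i+2] for i in range(len(a)-1)}
--     for j in range(len(b)-1):
--         if b[j:j+2] in bigrams:
--             return True
--     return False
-- ===== SOURCE B (Python) =====
-- def _has_common_bigram(a: str, b: str) -> bool:
--     xs = sorted(zip(a, a[1:]))
--     ys = sorted(zip(b, b[1:]))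
--     i = j = 0
--     while i < len(xs) and j < len(ys):
--         if xs[i] == ys[j]:
--             return True
--         if xs[i] < ys[j]:
--             i += 1
--         else:
--             j += 1
--     return False
-- ===== Notes on version B (the rewrite author's own statement) =====
-- stated objective: alternative
-- what changed: B sorts the two bigram lists and runs a two-pointer merge scan to detect a shared element, instead of A's hash-set comprehension plus early-exit membership scan over b.
import Mathlib
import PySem

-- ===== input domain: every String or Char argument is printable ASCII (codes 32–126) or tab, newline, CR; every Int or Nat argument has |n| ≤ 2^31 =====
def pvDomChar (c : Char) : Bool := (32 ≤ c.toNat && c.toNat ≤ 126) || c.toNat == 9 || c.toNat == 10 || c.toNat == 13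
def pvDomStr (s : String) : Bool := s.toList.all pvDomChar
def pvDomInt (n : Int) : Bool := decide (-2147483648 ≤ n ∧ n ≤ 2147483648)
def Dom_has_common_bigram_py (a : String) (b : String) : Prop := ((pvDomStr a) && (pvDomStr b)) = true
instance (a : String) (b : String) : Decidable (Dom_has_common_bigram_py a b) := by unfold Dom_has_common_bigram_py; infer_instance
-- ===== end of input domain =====

-- B replaces A's hash-set build plus early-exit membership scan by sorting both bigram lists
-- and detecting a shared element with a single two-pointer merge scan (alternative algorithm).

-- ===== PORT A =====
def has_common_bigram_py (a : String) (b : String) : Bool :=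
  if PySem.Str.len a < 2 || PySem.Str.len b < 2 then false
  else
    let bigrams : PySem.Set String :=
      PySem.Set.ofList ((PySem.List.pyRange 0 (PySem.Str.len a - 1) 1).map
        (fun i => PySem.Str.slice a (some i) (some (i + 2))))
    (PySem.List.pyRange 0 (PySem.Str.len b - 1) 1).any
      (fun j => PySem.Set.contains bigrams (PySem.Str.slice b (some j) (some (j + 2))))

-- ===== PORT B =====
-- zip(s, s[1:]) on a string = pairing the char list with its tail (exact: both truncate to the shorter).
-- Python's lexicographic order on two 2-tuples of characters is compared here through the injective,
-- order-preserving packing pvEnc (code of first char * 0x110000 + code of second); exact on all Chars.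
def pvEnc (p : Char × Char) : Nat := p.1.toNat * 1114112 + p.2.toNat

-- the while loop over two ascending indices, transcribed as recursion on the two sorted lists
def pvMergeBy {α : Type} [DecidableEq α] (enc : α → Nat) : List α → List α → Bool
  | [], _ => false
  | _ :: _, [] => false
  | x :: xs, y :: ys =>
    if x = y then true
    else if enc x < enc y then pvMergeBy enc xs (y :: ys)
    else pvMergeBy enc (x :: xs) ys
termination_by xs ys => xs.length + ys.length

def pvMerge (xs ys : List (Char × Char)) : Bool := pvMergeBy pvEnc xs ys

def has_common_bigram_py_alt (a : String) (b : String) : Bool :=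
  pvMerge (PySem.List.sorted (a.toList.zip a.toList.tail) pvEnc)
          (PySem.List.sorted (b.toList.zip b.toList.tail) pvEnc)

-- ===== PRECONDITION & SPEC =====
def Spec_has_common_bigram_py (a : String) (b : String) (out : Bool) : Prop := out = has_common_bigram_py_alt a b
instance (a : String) (b : String) (out : Bool) : Decidable (Spec_has_common_bigram_py a b out) := by unfold Spec_has_common_bigram_py; infer_instance

-- ===== CLAIM (what is proved, stated in full; the proofs are below) =====
def Claim_equal_has_common_bigram_py : Prop := ∀ (a : String) (b : String), Dom_has_common_bigram_py a b → Spec_has_common_bigram_py a b (has_common_bigram_py a b)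

-- ===== LEMMAS AND PROOFS =====

-- the shared characterisation: a and b have a common character-pair bigram
def pvCommon (la lb : List Char) : Prop :=
  ∃ n m : Nat, n + 2 ≤ la.length ∧ m + 2 ≤ lb.length ∧
    la[n]? = lb[m]? ∧ la[n + 1]? = lb[m + 1]?

theorem pv_char_toNat_lt (c : Char) : c.toNat < 1114112 := by
  have h := c.valid
  rcases h with h | ⟨h1, h2⟩ <;> (simp only [Char.toNat]; omega)

theorem pv_enc_inj {p q : Char × Char} (h : pvEnc p = pvEnc q) : p = q := by
  unfold pvEnc at h
  have h1 := pv_char_toNat_lt p.2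
  have h2 := pv_char_toNat_lt q.2
  have e1 : p.1.toNat = q.1.toNat := by omega
  have e2 : p.2.toNat = q.2.toNat := by omega
  have : p.1 = q.1 := Char.ext (UInt32.toNat_inj.mp e1)
  have : p.2 = q.2 := Char.ext (UInt32.toNat_inj.mp e2)
  cases p; cases q; simp_all

-- merge scan on two key-ascending lists detects exactly a shared element
theorem pvMerge_iff : ∀ (xs ys : List (Char × Char)),
    xs.Pairwise (fun p q => pvEnc p ≤ pvEnc q) → ys.Pairwise (fun p q => pvEnc p ≤ pvEnc q) →
    (pvMerge xs ys = true ↔ ∃ p, p ∈ xs ∧ p ∈ ys) := by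
  intro xs
  induction xs with
  | nil => intro ys _ _; simp [pvMerge, pvMergeBy]
  | cons x xs ihx =>
    intro ys
    induction ys with
    | nil => intro _ _; simp [pvMerge, pvMergeBy]
    | cons y ys ihy =>
      intro hx hy
      obtain ⟨hy1, hy2⟩ := List.pairwise_cons.mp hy
      obtain ⟨hx1, hx2⟩ := List.pairwise_cons.mp hx
      by_cases hxy : x = y
      · subst hxy
        simp [pvMerge, pvMergeBy]
      · by_cases hlt : pvEnc x < pvEnc y
        · rw [show pvMerge (x :: xs) (y :: ys) = pvMerge xs (y :: ys) by
            simp [pvMerge, pvMergeBy, hxy, hlt]]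
          rw [ihx (y :: ys) hx.tail hy]
          constructor
          · rintro ⟨p, hp1, hp2⟩; exact ⟨p, List.mem_cons_of_mem _ hp1, hp2⟩
          · rintro ⟨p, hp1, hp2⟩
            rcases List.mem_cons.mp hp1 with rfl | hp1
            · exfalso
              rcases List.mem_cons.mp hp2 with rfl | hp2
              · exact hxy rfl
              · exact absurd (hy1 p hp2) (by omega)
            · exact ⟨p, hp1, hp2⟩
        · rw [show pvMerge (x :: xs) (y :: ys) = pvMerge (x :: xs) ys by
            simp [pvMerge, pvMergeBy, hxy, hlt]]
          rw [ihy hx hy2]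
          constructor
          · rintro ⟨p, hp1, hp2⟩; exact ⟨p, hp1, List.mem_cons_of_mem _ hp2⟩
          · rintro ⟨p, hp1, hp2⟩
            rcases List.mem_cons.mp hp2 with rfl | hp2
            · exfalso
              rcases List.mem_cons.mp hp1 with rfl | hp1
              · exact hxy rfl
              · have := hx1 p hp1
                exact hxy (pv_enc_inj (by omega))
            · exact ⟨p, hp1, hp2⟩

theorem pv_take_two_drop {l : List Char} {n : Nat} (h : n + 2 ≤ l.length) :
    (l.drop n).take 2 = [l[n]'(by omega), l[n + 1]'(by omega)] := by
  have h1 : n < l.length := by omega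
  have h2 : n + 1 < l.length := by omega
  apply List.ext_getElem
  · simp; omega
  · intro i hi _
    simp only [List.length_take, List.length_drop] at hi
    have hi2 : i < 2 := by omega
    interval_cases i <;> simp [List.getElem_take, List.getElem_drop]

theorem pv_zip_tail_mem {l : List Char} {p : Char × Char} :
    p ∈ l.zip l.tail ↔ ∃ n : Nat, n + 2 ≤ l.length ∧ l[n]? = some p.1 ∧ l[n + 1]? = some p.2 := by
  rw [List.mem_iff_getElem]
  constructor
  · rintro ⟨n, hn, he⟩
    have hlen : (l.zip l.tail).length = l.length - 1 := by
      rw [List.length_zip, List.length_tail]; omega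
    have hn2 : n + 2 ≤ l.length := by omega
    refine ⟨n, hn2, ?_, ?_⟩
    · have := List.getElem_zip (l := l) (l' := l.tail) (i := n) (h := hn)
      rw [this] at he
      have : l[n]'(by omega) = p.1 := congrArg Prod.fst he
      simp [List.getElem?_eq_getElem (by omega : n < l.length), this]
    · have := List.getElem_zip (l := l) (l' := l.tail) (i := n) (h := hn)
      rw [this] at he
      have h2 : l.tail[n]'(by rw [List.length_tail]; omega) = p.2 := congrArg Prod.snd he
      rw [List.getElem_tail] at h2
      simp [List.getElem?_eq_getElem (by omega : n + 1 < l.length), h2]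
  · rintro ⟨n, hn, h1, h2⟩
    have hlen : (l.zip l.tail).length = l.length - 1 := by
      rw [List.length_zip, List.length_tail]; omega
    refine ⟨n, by omega, ?_⟩
    rw [List.getElem_zip]
    rw [List.getElem?_eq_getElem (by omega : n < l.length)] at h1
    rw [List.getElem?_eq_getElem (by omega : n + 1 < l.length)] at h2
    have := List.getElem_tail (l := l) (i := n) (h := by rw [List.length_tail]; omega)
    cases p with
    | mk x y =>
      simp only [Option.some_inj] at h1 h2
      simp_all

-- B = true ↔ pvCommon
theorem pv_alt_iff (a b : String) :
    has_common_bigram_py_alt a b = true ↔ pvCommon a.toList b.toList := by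
  unfold has_common_bigram_py_alt pvCommon
  rw [pvMerge_iff _ _ (PySem.List.sorted_pairwise _ _) (PySem.List.sorted_pairwise _ _)]
  constructor
  · rintro ⟨p, hp, hpb⟩
    rw [PySem.List.mem_sorted, pv_zip_tail_mem] at hp hpb
    obtain ⟨n, hn, ha1, ha2⟩ := hp
    obtain ⟨m, hm, hb1, hb2⟩ := hpb
    exact ⟨n, m, hn, hm, by rw [ha1, hb1], by rw [ha2, hb2]⟩
  · rintro ⟨n, m, hn, hm, h1, h2⟩
    have hn1 : n < a.toList.length := by omega
    have hn2 : n + 1 < a.toList.length := by omega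
    refine ⟨(a.toList[n]'hn1, a.toList[n+1]'hn2), ?_, ?_⟩
    · rw [PySem.List.mem_sorted, pv_zip_tail_mem]
      exact ⟨n, hn, by simp [List.getElem?_eq_getElem hn1], by simp [List.getElem?_eq_getElem hn2]⟩
    · rw [PySem.List.mem_sorted, pv_zip_tail_mem]
      refine ⟨m, hm, ?_, ?_⟩
      · rw [← h1]; simp [List.getElem?_eq_getElem hn1]
      · rw [← h2]; simp [List.getElem?_eq_getElem hn2]

-- slice s[n:n+2] as a two-character list
theorem pv_slice_two (s : String) (n : Nat) (h : n + 2 ≤ s.toList.length) :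
    (PySem.Str.slice s (some (n : Int)) (some ((n : Int) + 2))).toList
      = [s.toList[n]'(by omega), s.toList[n + 1]'(by omega)] := by
  rw [PySem.Str.toList_slice, PySem.Chars.slice_eq_listSlice]
  have : ((n : Int) + 2) = ((n : Int) + ((2 : Nat) : Int)) := by norm_num
  rw [this, PySem.List.slice_natCast_add, pv_take_two_drop h]

-- A = true ↔ pvCommon
theorem pv_a_iff (a b : String) :
    has_common_bigram_py a b = true ↔ pvCommon a.toList b.toList := by
  unfold has_common_bigram_py
  split_ifs with hg
  · simp only [false_iff]
    rintro ⟨n, m, hn, hm, -, -⟩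
    rw [Bool.or_eq_true, decide_eq_true_iff, decide_eq_true_iff, PySem.Str.len_eq, PySem.Str.len_eq] at hg
    omega
  · rw [Bool.or_eq_true, decide_eq_true_iff, decide_eq_true_iff, PySem.Str.len_eq, PySem.Str.len_eq] at hg
    push_neg at hg
    rw [List.any_eq_true]
    constructor
    · rintro ⟨j, hj, hc⟩
      rw [PySem.List.mem_pyRange_one] at hj
      rw [PySem.Set.contains_iff, PySem.Set.mem_ofList, List.mem_map] at hc
      obtain ⟨i, hi, he⟩ := hc
      rw [PySem.List.mem_pyRange_one] at hi
      obtain ⟨m, rfl⟩ : ∃ m : Nat, j = (m : Int) := ⟨j.toNat, (Int.toNat_of_nonneg hj.1).symm⟩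
      obtain ⟨n, rfl⟩ : ∃ n : Nat, i = (n : Int) := ⟨i.toNat, (Int.toNat_of_nonneg hi.1).symm⟩
      have hm : m + 2 ≤ b.toList.length := by
        have := hj.2; rw [PySem.Str.len_eq] at this; omega
      have hn : n + 2 ≤ a.toList.length := by
        have := hi.2; rw [PySem.Str.len_eq] at this; omega
      have := congrArg String.toList he
      rw [pv_slice_two a n hn, pv_slice_two b m hm] at this
      simp only [List.cons.injEq, and_true] at this
      exact ⟨n, m, hn, hm,
        by simp [List.getElem?_eq_getElem (show n < a.toList.length by omega),
                 List.getElem?_eq_getElem (show m < b.toList.length by omega), this.1],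
        by simp [List.getElem?_eq_getElem (show n + 1 < a.toList.length by omega),
                 List.getElem?_eq_getElem (show m + 1 < b.toList.length by omega), this.2]⟩
    · rintro ⟨n, m, hn, hm, h1, h2⟩
      refine ⟨(m : Int), ?_, ?_⟩
      · rw [PySem.List.mem_pyRange_one, PySem.Str.len_eq]
        constructor
        · exact Int.natCast_nonneg m
        · omega
      · rw [PySem.Set.contains_iff, PySem.Set.mem_ofList, List.mem_map]
        refine ⟨(n : Int), ?_, ?_⟩
        · rw [PySem.List.mem_pyRange_one, PySem.Str.len_eq]
          exact ⟨Int.natCast_nonneg n, by omega⟩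
        · apply String.toList_inj.mp
          rw [pv_slice_two a n hn, pv_slice_two b m hm]
          rw [List.getElem?_eq_getElem (show n < a.toList.length by omega),
              List.getElem?_eq_getElem (show m < b.toList.length by omega)] at h1
          rw [List.getElem?_eq_getElem (show n + 1 < a.toList.length by omega),
              List.getElem?_eq_getElem (show m + 1 < b.toList.length by omega)] at h2
          simp only [Option.some_inj] at h1 h2
          rw [h1, h2]

-- ===== VERDICT (by name: the statement is the Claim_ definition above) =====
theorem has_common_bigram_py_spec : Claim_equal_has_common_bigram_py := by
  intro a b _
  unfold Spec_has_common_bigram_py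
  have := (pv_a_iff a b).trans (pv_alt_iff a b).symm
  cases h : has_common_bigram_py_alt a b
  · cases h2 : has_common_bigram_py a b
    · rfl
    · exact absurd (this.mp h2) (by simp [h])
  · exact this.mpr h
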